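-- pv_equiv track=rewrite | github.com/FrigaZzz/linked-data-moba-ontology | extractUniqueValues.py | generate_intermediate_keys
-- ===== SOURCE A (Python) =====
-- def generate_intermediate_keys(data):
--     intermediate_keys = {}
--
--     for key in data.keys():
--         parts = key.split(".")
--         for i in range(len(parts)):
--             intermediate_key = ".".join(parts[:i+1])
--             intermediate_keys.setdefault(intermediate_key, [])
--             if i < len(parts) - 1 and parts[i+1] not in intermediate_keys[intermediate_key]:
--                 intermediate_keys[intermediate_key].append(parts[i+1])
--
--     for intermediate_key, subsequent_keys in intermediate_keys.items():
--         if intermediate_key not in data: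
--             data[intermediate_key] = subsequent_keys
--
--     return data
-- ===== SOURCE B (Python) =====
-- def generate_intermediate_keys(data):
--     # Single in-place pass (no separate intermediate_keys dict to merge afterwards):
--     # recursively walk each key's dotted path; prefixes that are original keys are
--     # skipped entirely, missing prefixes get a fresh list stored in data immediately
--     # and grown in place as later children of that prefix appear.
--     original = frozenset(data)
--     new_lists = {}
--
--     def visit(prefix, rest):
--         if prefix not in original:
--             lst = new_lists.get(prefix)
--             if lst is None:
--                 lst = []
--                 new_lists[prefix] = lst
--                 data[prefix] = lst
--             if rest and rest[0] not in lst: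
--                 lst.append(rest[0])
--         if rest:
--             visit(prefix + "." + rest[0], rest[1:])
--
--     for key in list(data):
--         parts = key.split(".")
--         visit(parts[0], parts[1:])
--     return data
-- ===== Notes on version B (the rewrite author's own statement) =====
-- stated objective: alternative
-- what changed: Replaces A's two-stage flat-prefix-dict algorithm (collect every prefix with its children into intermediate_keys, including prefixes already present in data, then merge the missing ones) by a single in-place pass: a recursive descent over each key's dotted path that skips prefixes which are original keys entirely and, at the first encounter of a missing prefix, stores a fresh list directly in data and grows that shared list in place as later children appear.
import Mathlib
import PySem

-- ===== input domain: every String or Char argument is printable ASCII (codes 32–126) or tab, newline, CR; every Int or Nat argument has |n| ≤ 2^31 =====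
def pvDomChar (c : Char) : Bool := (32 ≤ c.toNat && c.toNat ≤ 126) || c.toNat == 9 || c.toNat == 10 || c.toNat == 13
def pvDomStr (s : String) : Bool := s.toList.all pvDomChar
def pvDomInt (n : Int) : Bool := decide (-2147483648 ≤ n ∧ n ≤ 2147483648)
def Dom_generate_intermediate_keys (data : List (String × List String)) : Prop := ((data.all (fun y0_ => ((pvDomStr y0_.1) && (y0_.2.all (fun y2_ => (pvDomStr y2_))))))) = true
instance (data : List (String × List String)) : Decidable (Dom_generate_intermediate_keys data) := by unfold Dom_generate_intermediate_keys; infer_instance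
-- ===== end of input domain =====

-- B replaces A's two-stage algorithm (collect ALL prefixes with children into a separate
-- dict, then merge the missing ones into data) by a single in-place recursive descent per
-- key that skips original keys and grows the lists of missing prefixes directly in data
-- (objective: alternative decomposition). Both A and B mutate the argument dict in place
-- in Python; the equivalence proved here is about the returned dict (the same object).

-- ===== PORT A =====
-- one iteration of A's inner 'for i in range(len(parts))'
def gikStepA (parts : List String) (ik : PySem.Dict String (List String)) (i : Int) : PySem.Dict String (List String) :=
  let ikey := PySem.Str.join "." (PySem.List.slice parts none (some (i + 1)))
  let ik := ik.setdefault ikey []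
  -- parts[i+1]: only read under the guard i < len(parts)-1, so the .getD "" default is never the value used
  let nxt := (PySem.List.pyGet? parts (i + 1)).getD ""
  if i < (parts.length : Int) - 1 ∧ nxt ∉ ik.getD ikey [] then
    ik.modify ikey [] (fun l => l ++ [nxt])
  else ik

def generate_intermediate_keys (data : List (String × List String)) : List (String × List String) :=
  let ik : PySem.Dict String (List String) :=
    data.foldl (fun ik p =>
      let parts := (PySem.Str.split? p.1 ".").getD []   -- sep "." ≠ "", so split? is always some
      (PySem.List.pyRange 0 (parts.length : Int)).foldl (gikStepA parts) ik)
      PySem.Dict.empty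
  ik.items.foldl (fun acc q => if acc.any (fun r => r.1 == q.1) then acc else acc ++ [q]) data

-- ===== PORT B =====
-- B's recursive visit(prefix, rest). In Python data[prefix] = lst aliases new_lists[prefix]
-- and lst then grows in place; the port threads new_lists (st) alone and appends its final
-- items to data at the end, which is exact for the returned dict.
def gikVisit (origSet : PySem.Set String) (st : PySem.Dict String (List String)) (prefx : String) (rest : List String) : PySem.Dict String (List String) :=
  let st1 :=
    if prefx ∈ origSet then st
    else
      let lst := (st.get? prefx).getD []                      -- new_lists.get(prefix)
      let st' := if (st.get? prefx).isSome then st else st.insert prefx []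
      match rest with
      | [] => st'
      | x :: _ => if x ∈ lst then st' else st'.modify prefx [] (fun l => l ++ [x])
  match rest with
  | [] => st1
  | x :: rs => gikVisit origSet st1 (prefx ++ "." ++ x) rs

def generate_intermediate_keys_alt (data : List (String × List String)) : List (String × List String) :=
  let origSet : PySem.Set String := PySem.Set.ofList (data.map Prod.fst)   -- frozenset(data)
  let newd : PySem.Dict String (List String) :=
    data.foldl (fun st p =>
      match (PySem.Str.split? p.1 ".").getD [] with
      | [] => st   -- unreachable: split on "." yields at least one piece
      | p0 :: rest => gikVisit origSet st p0 rest)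
      PySem.Dict.empty
  data ++ newd.items

-- ===== PRECONDITION & SPEC =====
def Spec_generate_intermediate_keys (data : List (String × List String)) (out : List (String × List String)) : Prop := out = generate_intermediate_keys_alt data
instance (data : List (String × List String)) (out : List (String × List String)) : Decidable (Spec_generate_intermediate_keys data out) := by unfold Spec_generate_intermediate_keys; infer_instance

-- ===== CLAIM (what is proved, stated in full; the proofs are below) =====
def Claim_equal_generate_intermediate_keys : Prop := ∀ (data : List (String × List String)), Dom_generate_intermediate_keys data → Spec_generate_intermediate_keys data (generate_intermediate_keys data)

-- ===== LEMMAS AND PROOFS =====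

-- A's inner loop in running-prefix form (proof-side helper, used only by the lemmas)
def gikStepAr (st : PySem.Dict String (List String) × String) (part : String) :
    PySem.Dict String (List String) × String :=
  let tails := st.1.modify st.2 [] (fun s => PySem.Set.add s part)
  let pfx := st.2 ++ "." ++ part
  (tails.setdefault pfx [], pfx)

-- intermediate_keys restricted to the prefixes that are NOT original keys of data
def filtKs (ks : List String) (d : PySem.Dict String (List String)) : PySem.Dict String (List String) :=
  PySem.Dict.mk (d.items.filter (fun q => !decide (q.1 ∈ ks)))

-- '.'.join(l ++ [x]) = '.'.join(l) + '.' + x for nonempty l (List Char level)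
lemma charsJoin_append_singleton (sep x : List Char) :
    ∀ (l : List (List Char)), l ≠ [] →
      PySem.Chars.join sep (l ++ [x]) = PySem.Chars.join sep l ++ sep ++ x := by
  intro l
  induction l with
  | nil => intro h; exact absurd rfl h
  | cons a t ih =>
    intro _
    cases t with
    | nil => simp [PySem.Chars.join_cons_cons, PySem.Chars.join_singleton]
    | cons b u =>
      have := ih (by simp)
      simp only [List.cons_append, PySem.Chars.join_cons_cons] at *
      simp [this, List.append_assoc]

-- String-level corollary used to identify A's joined slice with the running prefix
lemma strJoin_append_singleton (l : List String) (hl : l ≠ []) (x : String) :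
    PySem.Str.join "." (l ++ [x]) = PySem.Str.join "." l ++ "." ++ x := by
  rw [← String.toList_inj]
  simp only [String.toList_append, PySem.Str.toList_join, List.map_append, List.map_cons,
    List.map_nil]
  exact charsJoin_append_singleton _ _ _ (by simpa using hl)

lemma strJoin_singleton (x : String) : PySem.Str.join "." [x] = x := by
  rw [← String.toList_inj]
  simp [PySem.Str.toList_join, PySem.Chars.join_singleton]

-- a keyed rewrite that touches no entry leaves the items unchanged
lemma map_keep_of_no_match {ν : Type} (k : String) (v : ν) (l : List (String × ν))
    (h : ∀ q ∈ l, q.1 ≠ k) :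
    l.map (fun p => if p.1 == k then (k, v) else p) = l := by
  have h2 : ∀ q ∈ l, (fun p => if p.1 == k then (k, v) else p) q = id q := by
    intro q hq; simp [h q hq]
  rw [List.map_congr_left h2, List.map_id]

-- re-inserting a key's own stored value leaves the dict unchanged (keys distinct)
lemma insert_getD_self_eq {ν : Type} (d : PySem.Dict String ν) (k : String) (v0 : ν)
    (hc : d.contains k = true) (hnd : d.keys.Nodup) : d.insert k (d.getD k v0) = d := by
  obtain ⟨items⟩ := d
  apply PySem.Dict.ext
  simp only [PySem.Dict.insert, hc, if_true]
  induction items with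
  | nil => simp [PySem.Dict.contains] at hc
  | cons p rest ih =>
    simp only [PySem.Dict.keys, List.map_cons, List.nodup_cons] at hnd
    by_cases hpk : p.1 = k
    · have hval : (PySem.Dict.mk (p :: rest)).getD k v0 = p.2 := by
        simp [PySem.Dict.getD, PySem.Dict.get?, hpk]
      rw [hval, List.map_cons, if_pos (by simp [hpk])]
      have htail : rest.map (fun q => if q.1 == k then (k, p.2) else q) = rest :=
        map_keep_of_no_match k p.2 rest (fun q hq hqk => by
          exact hnd.1 (List.mem_map.mpr ⟨q, hq, by rw [hqk, ← hpk]⟩))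
      rw [htail, ← hpk]
    · have hbeq : (p.1 == k) = false := by simp [hpk]
      have hc' : (PySem.Dict.mk rest).contains k = true := by
        simp only [PySem.Dict.contains, List.any_cons, hbeq, Bool.false_or] at hc
        exact hc
      have hval : (PySem.Dict.mk (p :: rest)).getD k v0 = (PySem.Dict.mk rest).getD k v0 := by
        simp [PySem.Dict.getD, PySem.Dict.get?, hbeq]
      rw [hval, List.map_cons, if_neg (by simp [hpk])]
      rw [ih hc' (by simpa [PySem.Dict.keys] using hnd.2)]

lemma nodup_keys_setdefault {ν : Type} (d : PySem.Dict String ν) (k : String) (v : ν)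
    (hnd : d.keys.Nodup) : (d.setdefault k v).keys.Nodup := by
  rw [PySem.Dict.keys_setdefault]
  split_ifs with hc
  · exact hnd
  · rw [List.nodup_append]
    refine ⟨hnd, List.nodup_singleton _, ?_⟩
    intro a ha b hb hab
    subst hab
    rw [List.mem_singleton] at hb
    subst hb
    exact hc ((PySem.Dict.contains_iff_mem_keys d a).mpr ha)

-- A's guarded list append equals Set.add via modify, on a dict that contains the key
lemma stepA_if_eq (g : Prop) [Decidable g] (hg : g) (d : PySem.Dict String (List String))
    (k x : String) (hc : d.contains k = true) (hnd : d.keys.Nodup) :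
    (if g ∧ x ∉ d.getD k [] then d.modify k [] (fun l => l ++ [x]) else d)
      = d.modify k [] (fun s => PySem.Set.add s x) := by
  by_cases hm2 : x ∈ d.getD k []
  · rw [if_neg (by tauto)]
    simp only [PySem.Dict.modify]
    rw [PySem.Set.add_of_mem hm2]
    exact (insert_getD_self_eq d k [] hc hnd).symm
  · rw [if_pos ⟨hg, hm2⟩]
    simp only [PySem.Dict.modify]
    rw [PySem.Set.add_of_not_mem hm2]

-- keys stay distinct through A's inner step
lemma nodup_gikStepA (parts : List String) (ik : PySem.Dict String (List String)) (i : Int)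
    (hnd : ik.keys.Nodup) : (gikStepA parts ik i).keys.Nodup := by
  simp only [gikStepA]
  have h1 := nodup_keys_setdefault ik
    (PySem.Str.join "." (PySem.List.slice parts none (some (i + 1)))) [] hnd
  split_ifs
  · exact PySem.Dict.nodup_keys_insert _ _ _ h1
  · exact h1

lemma nodup_foldA (parts : List String) :
    ∀ (l : List Int) (ik : PySem.Dict String (List String)), ik.keys.Nodup →
      (l.foldl (gikStepA parts) ik).keys.Nodup := by
  intro l
  induction l with
  | nil => intro ik h; exact h
  | cons a t ih => intro ik h; exact ih _ (nodup_gikStepA parts ik a h)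

-- the core alignment: A's indexed tail of the loop = the running-prefix fold
lemma key_loop : ∀ (rest pre : List String), pre ≠ [] →
    ∀ (ik : PySem.Dict String (List String)), ik.keys.Nodup →
    (PySem.List.pyRange ((pre.length : Int) - 1)
        ((pre.length : Int) + (rest.length : Int))).foldl (gikStepA (pre ++ rest)) ik
      = (rest.foldl gikStepAr (ik.setdefault (PySem.Str.join "." pre) [], PySem.Str.join "." pre)).1 := by
  intro rest
  induction rest with
  | nil =>
    intro pre hpre ik _
    have hm : 1 ≤ (pre.length : Int) := by
      have := List.length_pos_iff.mpr hpre; omega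
    rw [PySem.List.pyRange_one_cons (by simp only [List.length_nil]; omega),
      PySem.List.pyRange_one_eq_nil (by simp only [List.length_nil]; omega)]
    simp only [List.foldl_cons, List.foldl_nil, gikStepA]
    have hkey : PySem.List.slice (pre ++ []) none (some ((pre.length : Int) - 1 + 1)) = pre := by
      rw [PySem.List.slice_to (xs := pre ++ []) (b := (pre.length : Int) - 1 + 1) (by omega)]
      have ht : ((pre.length : Int) - 1 + 1).toNat = pre.length := by omega
      rw [ht]
      simp
    rw [hkey]
    rw [if_neg (fun hco => by
      simp only [List.append_nil] at hco
      omega)]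
  | cons x rs ih =>
    intro pre hpre ik hnd
    have hm : 1 ≤ (pre.length : Int) := by
      have := List.length_pos_iff.mpr hpre; omega
    have hlen : ((pre ++ x :: rs).length : Int) = (pre.length : Int) + (rs.length : Int) + 1 := by
      simp only [List.length_append, List.length_cons]; push_cast; omega
    rw [PySem.List.pyRange_one_cons (by simp only [List.length_cons]; push_cast; omega)]
    simp only [List.foldl_cons]
    -- evaluate the first A-iteration (index pre.length - 1)
    have hkey : PySem.List.slice (pre ++ x :: rs) none (some ((pre.length : Int) - 1 + 1)) = pre := by
      rw [PySem.List.slice_to (xs := pre ++ x :: rs) (b := (pre.length : Int) - 1 + 1) (by omega)]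
      have ht : ((pre.length : Int) - 1 + 1).toNat = pre.length := by omega
      rw [ht]
      exact List.take_left
    have hnx : (PySem.List.pyGet? (pre ++ x :: rs) ((pre.length : Int) - 1 + 1)).getD "" = x := by
      have h1 : ((pre.length : Int) - 1 + 1) = ((pre.length : Nat) : Int) := by omega
      rw [h1, PySem.List.pyGet?_natCast]
      simp
    have hc : (ik.setdefault (PySem.Str.join "." pre) []).contains (PySem.Str.join "." pre) = true := by
      rw [PySem.Dict.contains_setdefault]; simp
    have hnd' : (ik.setdefault (PySem.Str.join "." pre) []).keys.Nodup :=
      nodup_keys_setdefault ik _ _ hnd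
    have hA : gikStepA (pre ++ x :: rs) ik ((pre.length : Int) - 1)
        = (ik.setdefault (PySem.Str.join "." pre) []).modify (PySem.Str.join "." pre) []
            (fun s => PySem.Set.add s x) := by
      simp only [gikStepA]
      rw [hkey, hnx]
      exact stepA_if_eq _ (by omega) _ _ x hc hnd'
    rw [hA]
    have hndA : ((ik.setdefault (PySem.Str.join "." pre) []).modify (PySem.Str.join "." pre) []
        (fun s => PySem.Set.add s x)).keys.Nodup :=
      PySem.Dict.nodup_keys_insert _ _ _ hnd'
    have hrange : PySem.List.pyRange ((pre.length : Int) - 1 + 1)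
        ((pre.length : Int) + ((x :: rs).length : Int))
        = PySem.List.pyRange (((pre ++ [x]).length : Int) - 1)
            (((pre ++ [x]).length : Int) + (rs.length : Int)) := by
      congr 1 <;> (simp only [List.length_append, List.length_cons, List.length_nil]; push_cast; omega)
    have hparts : pre ++ x :: rs = (pre ++ [x]) ++ rs := by simp
    rw [hrange, hparts, ih (pre ++ [x]) (by simp) _ hndA]
    simp only [gikStepAr]
    rw [strJoin_append_singleton pre hpre x]

-- per key: A's whole indexed inner loop = the running-prefix form, for any split result
lemma key_eq (parts : List String) (ik : PySem.Dict String (List String)) (hnd : ik.keys.Nodup) :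
    (PySem.List.pyRange 0 (parts.length : Int)).foldl (gikStepA parts) ik
      = (match parts with
         | [] => ik
         | p0 :: rest => (rest.foldl gikStepAr (ik.setdefault p0 [], p0)).1) := by
  cases parts with
  | nil => simp [PySem.List.pyRange_one_eq_nil (by norm_num : (0:Int) ≤ 0)]
  | cons p0 rest =>
    have h := key_loop rest [p0] (by simp) ik hnd
    simp only [List.length_singleton, List.singleton_append, strJoin_singleton] at h
    push_cast at h
    have h2 : (1 + (rest.length : Int)) = ((rest.length : Nat) : Int) + 1 := by omega
    rw [h2] at h
    have h3 : (((p0 :: rest).length : Nat) : Int) = ((rest.length : Nat) : Int) + 1 := by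
      simp only [List.length_cons]; push_cast; omega
    rw [h3]
    exact h

lemma nodup_gikStepAr (st : PySem.Dict String (List String) × String) (part : String)
    (hnd : st.1.keys.Nodup) : (gikStepAr st part).1.keys.Nodup := by
  simp only [gikStepAr, PySem.Dict.modify]
  exact nodup_keys_setdefault _ _ _ (PySem.Dict.nodup_keys_insert _ _ _ hnd)

lemma nodup_foldAr : ∀ (l : List String) (st : PySem.Dict String (List String) × String),
    st.1.keys.Nodup → (l.foldl gikStepAr st).1.keys.Nodup := by
  intro l
  induction l with
  | nil => intro st h; exact h
  | cons a t ih => intro st h; exact ih _ (nodup_gikStepAr st a h)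

-- ===== facts about filtKs =====

lemma nodup_keys_filtKs (ks : List String) (d : PySem.Dict String (List String))
    (hnd : d.keys.Nodup) : (filtKs ks d).keys.Nodup := by
  simp only [filtKs, PySem.Dict.keys] at *
  exact hnd.sublist (List.Sublist.map _ List.filter_sublist)

lemma isSome_get?_eq_contains (d : PySem.Dict String (List String)) (k : String) :
    (d.get? k).isSome = d.contains k := by
  cases hg : d.get? k with
  | none => simp [(PySem.Dict.get?_eq_none_iff_contains d k).mp hg]
  | some v =>
    have hct : d.contains k = true := by
      rcases Bool.eq_false_or_eq_true (d.contains k) with h | h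
      · exact h
      · rw [(PySem.Dict.get?_eq_none_iff_contains d k).mpr h] at hg; cases hg
    simp [hct]

lemma find?_filter_key {ν : Type} (ks : List String) (k : String) (hk : k ∉ ks) :
    ∀ (l : List (String × ν)),
      (l.filter (fun q => !decide (q.1 ∈ ks))).find? (fun p => p.1 == k)
        = l.find? (fun p => p.1 == k) := by
  intro l
  induction l with
  | nil => simp
  | cons a t ih =>
    by_cases hak : a.1 = k
    · have hpr : a.1 ∉ ks := by rw [hak]; exact hk
      rw [List.filter_cons, if_pos (by simpa using hpr),
        List.find?_cons_of_pos (by simp [hak]), List.find?_cons_of_pos (by simp [hak])]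
    · by_cases hpr : a.1 ∈ ks
      · rw [List.filter_cons, if_neg (by simp [hpr]), ih,
          List.find?_cons_of_neg (by simp [hak])]
      · rw [List.filter_cons, if_pos (by simp [hpr]),
          List.find?_cons_of_neg (by simp [hak]), List.find?_cons_of_neg (by simp [hak]), ih]

lemma get?_filtKs (ks : List String) (d : PySem.Dict String (List String)) (k : String)
    (hk : k ∉ ks) : (filtKs ks d).get? k = d.get? k := by
  simp only [filtKs, PySem.Dict.get?]
  rw [find?_filter_key ks k hk]

lemma getD_filtKs (ks : List String) (d : PySem.Dict String (List String)) (k : String)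
    (hk : k ∉ ks) : (filtKs ks d).getD k [] = d.getD k [] := by
  simp only [PySem.Dict.getD, get?_filtKs ks d k hk]

lemma contains_filtKs (ks : List String) (d : PySem.Dict String (List String)) (k : String)
    (hk : k ∉ ks) : (filtKs ks d).contains k = d.contains k := by
  simp only [filtKs, PySem.Dict.contains]
  induction d.items with
  | nil => simp
  | cons a t ih =>
    by_cases hak : a.1 = k
    · have hpr : a.1 ∉ ks := by rw [hak]; exact hk
      rw [List.filter_cons, if_pos (by simpa using hpr), List.any_cons, List.any_cons, ih]
    · by_cases hpr : a.1 ∈ ks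
      · rw [List.filter_cons, if_neg (by simp [hpr]), List.any_cons, ih]
        simp [hak]
      · rw [List.filter_cons, if_pos (by simp [hpr]), List.any_cons, List.any_cons, ih]

lemma filter_map_repl_mem (ks : List String) (k : String) (v : List String) (hk : k ∈ ks) :
    ∀ (l : List (String × List String)),
      (l.map (fun p => if p.1 == k then (k, v) else p)).filter (fun q => !decide (q.1 ∈ ks))
        = l.filter (fun q => !decide (q.1 ∈ ks)) := by
  intro l
  induction l with
  | nil => simp
  | cons a t ih =>
    rw [List.map_cons]
    by_cases hak : a.1 = k
    · rw [show (if a.1 == k then (k, v) else a) = (k, v) by simp [hak],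
        List.filter_cons, if_neg (by simp [hk]),
        List.filter_cons, if_neg (by simp [hak, hk]), ih]
    · rw [show (if a.1 == k then (k, v) else a) = a by simp [hak],
        List.filter_cons, List.filter_cons]
      split_ifs
      · rw [ih]
      · exact ih

lemma filter_map_repl_not_mem (ks : List String) (k : String) (v : List String) (hk : k ∉ ks) :
    ∀ (l : List (String × List String)),
      (l.map (fun p => if p.1 == k then (k, v) else p)).filter (fun q => !decide (q.1 ∈ ks))
        = (l.filter (fun q => !decide (q.1 ∈ ks))).map (fun p => if p.1 == k then (k, v) else p) := by
  intro l
  induction l with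
  | nil => simp
  | cons a t ih =>
    rw [List.map_cons]
    by_cases hak : a.1 = k
    · rw [show (if a.1 == k then (k, v) else a) = (k, v) by simp [hak],
        List.filter_cons, if_pos (by simp [hk]),
        List.filter_cons, if_pos (by simp [hak, hk]),
        List.map_cons, show (if a.1 == k then (k, v) else a) = (k, v) by simp [hak], ih]
    · rw [show (if a.1 == k then (k, v) else a) = a by simp [hak],
        List.filter_cons, List.filter_cons]
      split_ifs
      · rw [List.map_cons, show (if a.1 == k then (k, v) else a) = a by simp [hak], ih]
      · exact ih

lemma filtKs_insert_mem (ks : List String) (d : PySem.Dict String (List String))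
    (k : String) (v : List String) (hk : k ∈ ks) :
    filtKs ks (d.insert k v) = filtKs ks d := by
  apply PySem.Dict.ext
  by_cases hc : d.contains k = true
  · simp only [filtKs, PySem.Dict.insert, hc, if_true]
    exact filter_map_repl_mem ks k v hk d.items
  · have hcf : d.contains k = false := by simpa using hc
    simp only [filtKs, PySem.Dict.insert, hcf, Bool.false_eq_true, if_false]
    rw [List.filter_append]
    simp [hk]

lemma filtKs_insert_not_mem (ks : List String) (d : PySem.Dict String (List String))
    (k : String) (v : List String) (hk : k ∉ ks) :
    filtKs ks (d.insert k v) = (filtKs ks d).insert k v := by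
  apply PySem.Dict.ext
  by_cases hc : d.contains k = true
  · have hc2 : (filtKs ks d).contains k = true := by rw [contains_filtKs ks d k hk]; exact hc
    simp only [filtKs] at hc2
    simp only [filtKs, PySem.Dict.insert, hc, hc2, if_true]
    exact filter_map_repl_not_mem ks k v hk d.items
  · have hcf : d.contains k = false := by simpa using hc
    have hcf2 : (filtKs ks d).contains k = false := by rw [contains_filtKs ks d k hk]; exact hcf
    simp only [filtKs] at hcf2
    simp only [filtKs, PySem.Dict.insert, hcf, hcf2, Bool.false_eq_true, if_false]
    rw [List.filter_append]
    simp [hk]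

lemma filtKs_setdefault_mem (ks : List String) (d : PySem.Dict String (List String))
    (k : String) (hk : k ∈ ks) : filtKs ks (d.setdefault k []) = filtKs ks d := by
  by_cases hc : d.contains k = true
  · rw [PySem.Dict.setdefault_of_contains d [] hc]
  · rw [PySem.Dict.setdefault_of_not_contains d [] (by simpa using hc)]
    exact filtKs_insert_mem ks d k [] hk

lemma filtKs_setdefault_not_mem (ks : List String) (d : PySem.Dict String (List String))
    (k : String) (hk : k ∉ ks) :
    filtKs ks (d.setdefault k []) = (filtKs ks d).setdefault k [] := by
  by_cases hc : d.contains k = true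
  · rw [PySem.Dict.setdefault_of_contains d [] hc,
      PySem.Dict.setdefault_of_contains _ [] (by rw [contains_filtKs ks d k hk]; exact hc)]
  · have hcf : d.contains k = false := by simpa using hc
    rw [PySem.Dict.setdefault_of_not_contains d [] hcf,
      PySem.Dict.setdefault_of_not_contains _ [] (by rw [contains_filtKs ks d k hk]; exact hcf)]
    exact filtKs_insert_not_mem ks d k [] hk

lemma filtKs_empty (ks : List String) : filtKs ks PySem.Dict.empty = PySem.Dict.empty := rfl

-- B's branch for one prefix equals filtKs of A's running-prefix update
lemma step_eq (ks : List String) (ik : PySem.Dict String (List String)) (prefx x : String)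
    (hnd : ik.keys.Nodup) :
    filtKs ks ((ik.setdefault prefx []).modify prefx [] (fun s => PySem.Set.add s x))
      = (if prefx ∈ PySem.Set.ofList ks then filtKs ks ik
         else
           let lst := ((filtKs ks ik).get? prefx).getD []
           let st' := if ((filtKs ks ik).get? prefx).isSome then filtKs ks ik
                      else (filtKs ks ik).insert prefx []
           if x ∈ lst then st' else st'.modify prefx [] (fun l => l ++ [x])) := by
  by_cases hm : prefx ∈ ks
  · rw [if_pos ((PySem.Set.mem_ofList ks prefx).mpr hm)]
    simp only [PySem.Dict.modify]
    rw [filtKs_insert_mem ks _ prefx _ hm, filtKs_setdefault_mem ks ik prefx hm]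
  · rw [if_neg (fun h => hm ((PySem.Set.mem_ofList ks prefx).mp h))]
    -- identify B's st' with (filtKs ks ik).setdefault prefx []
    have hsome := isSome_get?_eq_contains (filtKs ks ik) prefx
    have hst' : (if ((filtKs ks ik).get? prefx).isSome then filtKs ks ik
                 else (filtKs ks ik).insert prefx []) = (filtKs ks ik).setdefault prefx [] := by
      rw [hsome]
      by_cases hc : (filtKs ks ik).contains prefx = true
      · rw [hc, if_pos rfl, PySem.Dict.setdefault_of_contains _ [] hc]
      · have hcf : (filtKs ks ik).contains prefx = false := by simpa using hc
        rw [hcf, if_neg (by simp), PySem.Dict.setdefault_of_not_contains _ [] hcf]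
    have hlst : ((filtKs ks ik).get? prefx).getD [] = (ik.setdefault prefx []).getD prefx [] := by
      rw [PySem.Dict.getD_setdefault_self]
      have := getD_filtKs ks ik prefx hm
      simp only [PySem.Dict.getD] at this ⊢
      exact this
    set S := (filtKs ks ik).setdefault prefx [] with hS
    have hndS : S.keys.Nodup := nodup_keys_setdefault _ _ _ (nodup_keys_filtKs ks ik hnd)
    have hcS : S.contains prefx = true := by
      rw [hS, PySem.Dict.contains_setdefault]; simp
    have hvS : S.getD prefx [] = (ik.setdefault prefx []).getD prefx [] := by
      rw [hS, PySem.Dict.getD_setdefault_self, PySem.Dict.getD_setdefault_self]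
      exact getD_filtKs ks ik prefx hm
    have hLHS : filtKs ks ((ik.setdefault prefx []).modify prefx [] (fun s => PySem.Set.add s x))
        = S.insert prefx (PySem.Set.add ((ik.setdefault prefx []).getD prefx []) x) := by
      simp only [PySem.Dict.modify]
      rw [filtKs_insert_not_mem ks _ prefx _ hm, filtKs_setdefault_not_mem ks ik prefx hm]
    rw [hLHS]
    simp only [hst', hlst]
    by_cases hx : x ∈ (ik.setdefault prefx []).getD prefx []
    · rw [if_pos hx, PySem.Set.add_of_mem hx, ← hvS]
      exact insert_getD_self_eq S prefx [] hcS hndS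
    · rw [if_neg hx, PySem.Set.add_of_not_mem hx]
      simp only [PySem.Dict.modify]
      rw [hvS]

-- per key: filtKs of A's running-prefix loop = B's recursive visit
lemma visit_eq (ks : List String) : ∀ (rest : List String) (prefx : String)
    (ik : PySem.Dict String (List String)), ik.keys.Nodup →
    filtKs ks ((rest.foldl gikStepAr (ik.setdefault prefx [], prefx)).1)
      = gikVisit (PySem.Set.ofList ks) (filtKs ks ik) prefx rest := by
  intro rest
  induction rest with
  | nil =>
    intro prefx ik hnd
    simp only [List.foldl_nil, gikVisit]
    by_cases hm : prefx ∈ ks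
    · rw [if_pos ((PySem.Set.mem_ofList ks prefx).mpr hm)]
      exact filtKs_setdefault_mem ks ik prefx hm
    · rw [if_neg (fun h => hm ((PySem.Set.mem_ofList ks prefx).mp h))]
      rw [filtKs_setdefault_not_mem ks ik prefx hm]
      have hsome := isSome_get?_eq_contains (filtKs ks ik) prefx
      rw [hsome]
      by_cases hc : (filtKs ks ik).contains prefx = true
      · rw [hc, if_pos rfl, PySem.Dict.setdefault_of_contains _ [] hc]
      · have hcf : (filtKs ks ik).contains prefx = false := by simpa using hc
        rw [hcf, if_neg (by simp), PySem.Dict.setdefault_of_not_contains _ [] hcf]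
  | cons x rs ih =>
    intro prefx ik hnd
    simp only [List.foldl_cons]
    have hstep : gikStepAr (ik.setdefault prefx [], prefx) x
        = (((ik.setdefault prefx []).modify prefx [] (fun s => PySem.Set.add s x)).setdefault
            (prefx ++ "." ++ x) [], prefx ++ "." ++ x) := rfl
    rw [hstep]
    have hndmid : ((ik.setdefault prefx []).modify prefx []
        (fun s => PySem.Set.add s x)).keys.Nodup := by
      simp only [PySem.Dict.modify]
      exact PySem.Dict.nodup_keys_insert _ _ _ (nodup_keys_setdefault ik prefx [] hnd)
    rw [ih (prefx ++ "." ++ x) _ hndmid]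
    rw [step_eq ks ik prefx x hnd]
    rfl

-- whole first phase: filtKs of A's prefix dict = B's new_lists dict
lemma fold_eq (ks : List String) : ∀ (data : List (String × List String))
    (ik : PySem.Dict String (List String)), ik.keys.Nodup →
    filtKs ks (data.foldl (fun ik p =>
        let parts := (PySem.Str.split? p.1 ".").getD []
        (PySem.List.pyRange 0 (parts.length : Int)).foldl (gikStepA parts) ik) ik)
      = data.foldl (fun st p =>
          match (PySem.Str.split? p.1 ".").getD [] with
          | [] => st
          | p0 :: rest => gikVisit (PySem.Set.ofList ks) st p0 rest) (filtKs ks ik) := by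
  intro data
  induction data with
  | nil => intro ik _; rfl
  | cons p t ih =>
    intro ik hnd
    simp only [List.foldl_cons]
    rw [key_eq ((PySem.Str.split? p.1 ".").getD []) ik hnd]
    cases hsp : (PySem.Str.split? p.1 ".").getD [] with
    | nil => exact ih ik hnd
    | cons p0 rest =>
      have hnd' : ((rest.foldl gikStepAr (ik.setdefault p0 [], p0)).1).keys.Nodup :=
        nodup_foldAr rest _ (nodup_keys_setdefault ik p0 [] hnd)
      rw [ih _ hnd', visit_eq ks rest p0 ik hnd]

-- second phase of A: append-if-new over a key-distinct list is a filter against the start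
lemma phase2_aux : ∀ (l acc : List (String × List String)), (l.map Prod.fst).Nodup →
    l.foldl (fun acc q => if acc.any (fun r => r.1 == q.1) then acc else acc ++ [q]) acc
      = acc ++ l.filter (fun q => !(acc.any (fun r => r.1 == q.1))) := by
  intro l
  induction l with
  | nil => intro acc _; simp
  | cons q t ih =>
    intro acc hnd
    simp only [List.map_cons, List.nodup_cons] at hnd
    rw [List.foldl_cons, List.filter_cons]
    by_cases hc : acc.any (fun r => r.1 == q.1) = true
    · rw [if_pos hc, if_neg ?h, ih acc hnd.2]
      case h => rw [hc]; simp
    · have hcf : acc.any (fun r => r.1 == q.1) = false := Bool.eq_false_iff.mpr hc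
      rw [if_neg hc, if_pos ?h2, ih (acc ++ [q]) hnd.2]
      case h2 => rw [hcf]; simp
      have hfc : t.filter (fun r => !((acc ++ [q]).any (fun s => s.1 == r.1)))
          = t.filter (fun r => !(acc.any (fun s => s.1 == r.1))) := by
        apply List.filter_congr
        intro r hr
        have hne : r.1 ≠ q.1 := fun he => hnd.1 (List.mem_map.mpr ⟨r, hr, he⟩)
        have hq : (q.1 == r.1) = false := beq_eq_false_iff_ne.mpr (Ne.symm hne)
        simp [List.any_append, hq]
      rw [hfc, List.append_assoc, List.singleton_append]

-- 'some key of acc equals k' is exactly membership of k in acc's keys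
lemma any_key_eq_mem (l : List (String × List String)) (k : String) :
    (l.any (fun r => r.1 == k)) = decide (k ∈ l.map Prod.fst) := by
  induction l with
  | nil => simp
  | cons a t ih =>
    rw [List.any_cons, ih, List.map_cons]
    by_cases h : a.1 = k
    · simp [h]
    · simp [beq_eq_false_iff_ne.mpr h, beq_eq_false_iff_ne.mpr (Ne.symm h)]

lemma nodup_outerA : ∀ (data : List (String × List String))
    (ik : PySem.Dict String (List String)), ik.keys.Nodup →
    (data.foldl (fun ik p =>
        let parts := (PySem.Str.split? p.1 ".").getD []
        (PySem.List.pyRange 0 (parts.length : Int)).foldl (gikStepA parts) ik) ik).keys.Nodup := by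
  intro data
  induction data with
  | nil => intro ik h; exact h
  | cons p t ih => intro ik h; exact ih _ (nodup_foldA _ _ ik h)

-- ===== VERDICT (by name: the statement is the Claim_ definition above) =====
theorem generate_intermediate_keys_spec : Claim_equal_generate_intermediate_keys := by
  intro data _
  show generate_intermediate_keys data = generate_intermediate_keys_alt data
  have hnde : (PySem.Dict.empty : PySem.Dict String (List String)).keys.Nodup := by
    simp [PySem.Dict.keys, PySem.Dict.empty]
  have hA : generate_intermediate_keys data
      = (data.foldl (fun ik p =>
            let parts := (PySem.Str.split? p.1 ".").getD []
            (PySem.List.pyRange 0 (parts.length : Int)).foldl (gikStepA parts) ik)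
          PySem.Dict.empty).items.foldl
          (fun acc q => if acc.any (fun r => r.1 == q.1) then acc else acc ++ [q]) data := rfl
  have hBdef : generate_intermediate_keys_alt data
      = data ++ (data.foldl (fun st p =>
            match (PySem.Str.split? p.1 ".").getD [] with
            | [] => st
            | p0 :: rest => gikVisit (PySem.Set.ofList (data.map Prod.fst)) st p0 rest)
          PySem.Dict.empty).items := rfl
  have hB := fold_eq (data.map Prod.fst) data PySem.Dict.empty hnde
  rw [filtKs_empty] at hB
  have hndF : ((data.foldl (fun ik p =>
        let parts := (PySem.Str.split? p.1 ".").getD []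
        (PySem.List.pyRange 0 (parts.length : Int)).foldl (gikStepA parts) ik)
      PySem.Dict.empty).items.map Prod.fst).Nodup := by
    have := nodup_outerA data PySem.Dict.empty hnde
    simpa [PySem.Dict.keys] using this
  rw [hA, hBdef, ← hB, phase2_aux _ data hndF]
  simp only [filtKs]
  congr 1
  apply List.filter_congr
  intro q _
  rw [any_key_eq_mem data q.1]
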